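-- pv_equiv track=rewrite | github.com/stonecold344/INTPolybotServiceTerraform | tf/yolo5/app.py | format_prediction_summary
-- ===== SOURCE A (Python) =====
-- def format_prediction_summary(labels):
--     """Formats prediction results to show object counts."""
--     # Initialize a dictionary to keep counts
--     object_counts = {}
--
--     # Count occurrences of each object
--     for label in labels:
--         object_name = label['class']
--         if object_name in object_counts:
--             object_counts[object_name] += 1
--         else:
--             object_counts[object_name] = 1
--
--     # Construct the result message
--     result_lines = [f"{object_name}:{count}" for object_name, count in object_counts.items()]
--     return "\n".join(result_lines)
-- ===== SOURCE B (Python) =====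
-- def format_prediction_summary(labels):
--     """Formats prediction results to show object counts."""
--     names = [label['class'] for label in labels]
--     lines = []
--     while names:
--         name = names[0]
--         rest = [n for n in names if n != name]
--         lines.append(f"{name}:{len(names) - len(rest)}")
--         names = rest
--     return "\n".join(lines)
-- ===== Notes on version B (the rewrite author's own statement) =====
-- stated objective: alternative
-- what changed: Replaces A's single counting-dict pass by an extract-and-filter loop: repeatedly take the first remaining class name, obtain its count as the length drop after filtering out all its occurrences, and continue on the filtered remainder; no dictionary or counter is maintained.
import Mathlib
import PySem

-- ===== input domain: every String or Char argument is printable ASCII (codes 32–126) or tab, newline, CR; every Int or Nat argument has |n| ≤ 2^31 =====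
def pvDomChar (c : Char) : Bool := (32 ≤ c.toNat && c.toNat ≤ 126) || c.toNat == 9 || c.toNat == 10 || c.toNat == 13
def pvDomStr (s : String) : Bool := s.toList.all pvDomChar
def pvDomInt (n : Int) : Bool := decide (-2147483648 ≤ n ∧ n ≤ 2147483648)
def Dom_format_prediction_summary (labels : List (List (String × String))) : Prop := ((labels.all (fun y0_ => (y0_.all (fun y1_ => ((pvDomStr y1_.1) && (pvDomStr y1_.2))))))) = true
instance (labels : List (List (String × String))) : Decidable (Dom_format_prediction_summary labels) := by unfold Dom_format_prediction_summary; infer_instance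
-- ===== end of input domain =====

-- B replaces A's counting-dict pass by an extract-and-filter loop with no dict (return value only; neither mutates its argument).

-- ===== PORT A =====
-- label['class'] : first match in the association list; none would be a KeyError (excluded by Pre_)
def pyClassOf (label : List (String × String)) : String :=
  ((PySem.Dict.mk label).get? "class").getD ""

def format_prediction_summary (labels : List (List (String × String))) : String :=
  let object_counts := labels.foldl (fun d label =>
      let object_name := pyClassOf label
      if d.contains object_name then d.insert object_name (d.getD object_name 0 + 1)
      else d.insert object_name (1 : Int)) PySem.Dict.empty
  PySem.Str.join "\n" (object_counts.items.map (fun p => p.1 ++ ":" ++ PySem.Int.toStr p.2))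

-- ===== PORT B =====
-- the while-loop of Source B: extract the first name, count it by the length drop of the filter, continue on the remainder
def fpsLoop : List String → List String
  | [] => []
  | name :: tail =>
      let rest := (name :: tail).filter (fun m => !(m == name))
      (name ++ ":" ++ PySem.Int.toStr (((name :: tail).length : Int) - (rest.length : Int)))
        :: fpsLoop rest
termination_by ns => ns.length
decreasing_by
  simp only [List.filter_cons, beq_self_eq_true, Bool.not_true, List.length_cons]
  exact Nat.lt_succ_of_le (List.length_filter_le _ _)

def format_prediction_summary_alt (labels : List (List (String × String))) : String :=
  let names := labels.map pyClassOf
  PySem.Str.join "\n" (fpsLoop names)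

-- ===== PRECONDITION & SPEC =====
-- Pre_ excludes labels missing the 'class' key, on which both Pythons raise KeyError.
def Pre_format_prediction_summary (labels : List (List (String × String))) : Prop :=
  (labels.all (fun l => l.any (fun p => p.1 == "class"))) = true
instance (labels : List (List (String × String))) : Decidable (Pre_format_prediction_summary labels) := by unfold Pre_format_prediction_summary; infer_instance
def pvWitness_format_prediction_summary : (List (List (String × String))) :=
  [[("class","cat")],[("class","dog")],[("class","cat")]]

def Spec_format_prediction_summary (labels : List (List (String × String))) (out : String) : Prop := out = format_prediction_summary_alt labels
instance (labels : List (List (String × String))) (out : String) : Decidable (Spec_format_prediction_summary labels out) := by unfold Spec_format_prediction_summary; infer_instance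

-- ===== CLAIM (what is proved, stated in full; the proofs are below) =====
def Claim_equal_format_prediction_summary : Prop := ∀ (labels : List (List (String × String))), Dom_format_prediction_summary labels → Pre_format_prediction_summary labels → Spec_format_prediction_summary labels (format_prediction_summary labels)

-- ===== LEMMAS AND PROOFS =====

-- A's loop step ('if name in d: d[name] += 1 else: d[name] = 1') is exactly Counter's modify step.
theorem step_eq_modify (d : PySem.Dict String Int) (x : String) :
    (if d.contains x then d.insert x (d.getD x 0 + 1) else d.insert x (1 : Int)) =
      d.modify x 0 (· + 1) := by
  unfold PySem.Dict.modify PySem.Dict.getD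
  split_ifs with h
  · cases hg : d.get? x with
    | none => rw [PySem.Dict.get?_eq_none_iff_contains] at hg
    | some v => simp
  · cases hg : d.get? x with
    | none => simp
    | some v =>
      exfalso
      have hn : d.get? x = none := by rw [PySem.Dict.get?_eq_none_iff_contains]; simpa using h
      simp [hg] at hn

theorem foldA_eq_counter (labels : List (List (String × String))) :
    labels.foldl (fun d label =>
        let object_name := pyClassOf label
        if d.contains object_name then d.insert object_name (d.getD object_name 0 + 1)
        else d.insert object_name (1 : Int)) PySem.Dict.empty
      = PySem.Dict.counter (labels.map pyClassOf) := by
  rw [PySem.Dict.counter_eq_foldl, List.foldl_map]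
  simp only [step_eq_modify]

-- adding an element already present is a no-op through the whole fold
theorem foldl_add_filter (n : String) :
    ∀ (t s : List String), n ∈ s →
      t.foldl PySem.Set.add s = (t.filter (fun m => !(m == n))).foldl PySem.Set.add s := by
  intro t
  induction t with
  | nil => intro s _; rfl
  | cons x xs ih =>
    intro s hn
    by_cases hx : x = n
    · subst hx
      have : PySem.Set.add s x = s := by
        simp [PySem.Set.add, PySem.Set.contains, hn]
      simp [List.foldl_cons, this, ih s hn]
    · have hb : (!(x == n)) = true := by simp [hx]
      simp only [List.filter_cons, hb, if_pos, List.foldl_cons]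
      exact ih (PySem.Set.add s x) (by simp [PySem.Set.add, PySem.Set.contains]; split <;> simp [hn])

-- a fold starting from a bigger seed list: the seed's head stays in front when it never recurs
theorem foldl_add_cons (n : String) :
    ∀ (t s : List String), n ∉ t →
      t.foldl PySem.Set.add (n :: s) = n :: t.foldl PySem.Set.add s := by
  intro t
  induction t with
  | nil => intro s _; rfl
  | cons x xs ih =>
    intro s hn
    have hxn : x ≠ n := fun h => hn (h ▸ List.mem_cons_self)
    have hstep : PySem.Set.add (n :: s) x = n :: PySem.Set.add s x := by
      simp [PySem.Set.add, PySem.Set.contains, hxn]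
      split <;> simp
    simp only [List.foldl_cons, hstep]
    exact ih _ (fun h => hn (List.mem_cons_of_mem _ h))

-- first-occurrence dedup unfolds like B's loop: head, then dedup of the filtered remainder
theorem ofList_cons_filter (n : String) (t : List String) :
    PySem.Set.ofList (n :: t) =
      n :: PySem.Set.ofList (t.filter (fun m => !(m == n))) := by
  have h0 : PySem.Set.ofList (n :: t) = t.foldl PySem.Set.add [n] := by
    simp [PySem.Set.ofList_eq_foldl, PySem.Set.add, PySem.Set.contains]
  rw [h0, foldl_add_filter n t [n] (by simp)]
  rw [foldl_add_cons n _ [] (by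
    intro h
    have := List.of_mem_filter h
    simp at this)]
  rw [PySem.Set.ofList_eq_foldl]

-- the count of the head equals the length drop of the filter
theorem count_eq_length_sub (n : String) (t : List String) :
    ((n :: t).count n : Int) =
      ((n :: t).length : Int) - (((n :: t).filter (fun m => !(m == n))).length : Int) := by
  have h1 : (n :: t).count n = ((n :: t).filter (fun m => m == n)).length := by
    simp [List.count, List.countP_eq_length_filter]
  have h2 : ((n :: t).filter (fun m => m == n)).length
      + ((n :: t).filter (fun m => !(m == n))).length = (n :: t).length := by
    induction (n :: t) with
    | nil => rfl
    | cons x xs ih => by_cases h : x == n <;> simp [h] <;> omega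
  omega

-- count is unchanged by filtering out a different name
theorem count_filter_ne (n x : String) (t : List String) (hx : x ≠ n) :
    (t.filter (fun m => !(m == n))).count x = t.count x := by
  rw [List.count_filter]
  simp [hx]

-- B's loop computes the dedup-and-count lines
theorem fpsLoop_eq (ns : List String) :
    fpsLoop ns = (PySem.Set.ofList ns).map (fun n => n ++ ":" ++ PySem.Int.toStr (ns.count n : Int)) := by
  match ns with
  | [] => simp [fpsLoop, PySem.Set.ofList, PySem.Set.empty]
  | name :: tail =>
    have hrest : (name :: tail).filter (fun m => !(m == name)) = tail.filter (fun m => !(m == name)) := by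
      simp
    have hlen : (tail.filter (fun m => !(m == name))).length < (name :: tail).length := by
      simp only [List.length_cons]
      exact Nat.lt_succ_of_le (List.length_filter_le _ _)
    have ih := fpsLoop_eq (tail.filter (fun m => !(m == name)))
    rw [fpsLoop, ofList_cons_filter, List.map_cons, hrest, ih]
    refine congrArg₂ _ ?_ ?_
    · rw [← hrest, ← count_eq_length_sub]
    · refine List.map_congr_left ?_
      intro x hx
      have hxf : x ∈ tail.filter (fun m => !(m == name)) := by
        have := PySem.List.mem_dedup (xs := tail.filter (fun m => !(m == name))) (x := x)
        simp only [PySem.List.dedup_eq_ofList] at this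
        exact this.mp hx
      have hxn : x ≠ name := by
        have := List.of_mem_filter hxf
        simpa using this
      have hc : (tail.filter (fun m => !(m == name))).count x = tail.count x :=
        count_filter_ne name x tail hxn
      rw [hc]
      have : (name :: tail).count x = tail.count x := by
        rw [List.count_cons]
        simp [Ne.symm hxn]
      rw [this]
termination_by ns.length
decreasing_by
  simp only [List.length_cons]
  exact Nat.lt_succ_of_le (List.length_filter_le _ _)

-- ===== VERDICT (by name: the statement is the Claim_ definition above) =====
theorem format_prediction_summary_spec : Claim_equal_format_prediction_summary := by
  intro labels _ _
  unfold Spec_format_prediction_summary format_prediction_summary format_prediction_summary_alt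
  rw [foldA_eq_counter]
  simp [PySem.Dict.items_counter, fpsLoop_eq, Function.comp_def]
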